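-- pv_equiv track=rewrite | github.com/dileeme/bioinformatics-workups | algorithms-week2/compare_spectra.py | minkowski_difference
-- ===== SOURCE A (Python) =====
-- from collections import Counter
--
-- def minkowski_difference(S1, S2):
--     differences = Counter()
--     for s1 in S1:
--         for s2 in S2:
--             diff = s1 - s2
--             differences[diff] += 1
--
--     max_multiplicity = max(differences.values())
--     max_x = max(k for k, v in differences.items() if v == max_multiplicity)
--
--     return max_multiplicity, max_x
-- ===== SOURCE B (Python) =====
-- def minkowski_difference(S1, S2):
--     diffs = sorted(s1 - s2 for s1 in S1 for s2 in S2)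
--     if not diffs:
--         raise ValueError("empty spectrum")
--     best_m, best_v = 0, diffs[0]
--     run_v, run_m = diffs[0], 0
--     for d in diffs:
--         if d == run_v:
--             run_m += 1
--         else:
--             if run_m >= best_m:
--                 best_m, best_v = run_m, run_v
--             run_v, run_m = d, 1
--     if run_m >= best_m:
--         best_m, best_v = run_m, run_v
--     return best_m, best_v
-- ===== Notes on version B (the rewrite author's own statement) =====
-- stated objective: alternative
-- what changed: Replaces A's Counter dictionary plus two separate max() passes (over values, then over a filtered key generator) with building the flat list of pairwise differences, sorting it ascending, and one run-length scan that tracks the best (multiplicity, value) with >= updates so the largest value wins ties.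
-- outside the precondition, e.g. on minkowski_difference([], [1]): A raises ValueError, B raises ValueError
import Mathlib
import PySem

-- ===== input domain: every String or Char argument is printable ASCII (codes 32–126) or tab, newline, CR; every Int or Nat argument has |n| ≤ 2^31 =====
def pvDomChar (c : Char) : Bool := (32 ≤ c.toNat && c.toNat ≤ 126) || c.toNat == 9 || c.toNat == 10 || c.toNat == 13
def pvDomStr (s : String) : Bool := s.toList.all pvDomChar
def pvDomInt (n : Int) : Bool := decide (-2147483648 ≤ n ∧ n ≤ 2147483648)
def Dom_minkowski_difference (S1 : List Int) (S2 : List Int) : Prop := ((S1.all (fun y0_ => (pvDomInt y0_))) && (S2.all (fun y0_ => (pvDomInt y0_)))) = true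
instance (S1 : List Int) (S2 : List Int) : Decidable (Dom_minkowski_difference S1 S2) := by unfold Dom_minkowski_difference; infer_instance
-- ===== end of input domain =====

-- B replaces A's Counter-then-two-max-passes with sort-then-single-run-scan (alternative
-- decomposition, not claimed faster); return values agree on all nonempty inputs.

-- ===== PORT A =====
-- A: build a Counter of all pairwise differences, then max of the counts, then the
-- largest key whose count equals that maximum.
def minkowski_difference (S1 : List Int) (S2 : List Int) : Int × Int :=
  let differences := S1.foldl (fun d s1 =>
      S2.foldl (fun d s2 => d.modify (s1 - s2) 0 (· + 1)) d) (PySem.Dict.empty : PySem.Dict Int Int)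
  -- max() raises ValueError on an empty Counter (S1 = [] or S2 = []); excluded by Pre_
  let max_multiplicity := (PySem.List.max? differences.values (fun v => v)).getD 0
  let max_x := (PySem.List.max?
      (((differences.items).filter (fun kv => kv.2 == max_multiplicity)).map Prod.fst)
      (fun k => k)).getD 0
  (max_multiplicity, max_x)

-- ===== PORT B =====
-- state = (run_v, run_m, best_m, best_v)
def mdStep (st : Int × Int × Int × Int) (d : Int) : Int × Int × Int × Int :=
  if d = st.1 then (st.1, st.2.1 + 1, st.2.2.1, st.2.2.2)
  else if st.2.2.1 ≤ st.2.1 then (d, 1, st.2.1, st.1)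
  else (d, 1, st.2.2.1, st.2.2.2)

def minkowski_difference_alt (S1 : List Int) (S2 : List Int) : Int × Int :=
  let diffs := PySem.List.sorted (S1.flatMap (fun s1 => S2.map (fun s2 => s1 - s2))) (fun x => x) false
  match diffs with
  | [] => (0, 0)   -- Source B raises ValueError here; excluded by Pre_
  | d0 :: t =>
    let st := (d0 :: t).foldl mdStep (d0, 0, 0, d0)
    if st.2.2.1 ≤ st.2.1 then (st.2.1, st.1) else (st.2.2.1, st.2.2.2)

-- ===== PRECONDITION & SPEC =====
-- Pre_ excludes exactly the inputs where A raises ValueError (max() of the empty Counter):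
-- S1 = [] or S2 = []; B raises ValueError there too.
def Pre_minkowski_difference (S1 : List Int) (S2 : List Int) : Prop := S1 ≠ [] ∧ S2 ≠ []
instance (S1 : List Int) (S2 : List Int) : Decidable (Pre_minkowski_difference S1 S2) := by
  unfold Pre_minkowski_difference; infer_instance

def pvWitness_minkowski_difference : List Int × List Int := ([3, 5, 3], [1, 2])

def Spec_minkowski_difference (S1 : List Int) (S2 : List Int) (out : Int × Int) : Prop := out = minkowski_difference_alt S1 S2
instance (S1 : List Int) (S2 : List Int) (out : Int × Int) : Decidable (Spec_minkowski_difference S1 S2 out) := by unfold Spec_minkowski_difference; infer_instance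

-- ===== CLAIM (what is proved, stated in full; the proofs are below) =====
def Claim_equal_minkowski_difference : Prop := ∀ (S1 : List Int) (S2 : List Int), Dom_minkowski_difference S1 S2 → Pre_minkowski_difference S1 S2 → Spec_minkowski_difference S1 S2 (minkowski_difference S1 S2)

-- ===== LEMMAS AND PROOFS =====

-- (M, X) is "the" answer for the multiset l: M is the maximal multiplicity in l and X is
-- the largest value of l attaining it.
def GoodPair (l : List Int) (M X : Int) : Prop :=
  (∀ v ∈ l, (l.count v : Int) ≤ M) ∧ (∃ v ∈ l, (l.count v : Int) = M) ∧
  X ∈ l ∧ (l.count X : Int) = M ∧ (∀ v ∈ l, (l.count v : Int) = M → v ≤ X)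

lemma GoodPair.unique {l : List Int} {M X M' X' : Int}
    (h : GoodPair l M X) (h' : GoodPair l M' X') : M = M' ∧ X = X' := by
  obtain ⟨hub, ⟨v, hv, hvc⟩, hX, hXc, hmax⟩ := h
  obtain ⟨hub', ⟨v', hv', hvc'⟩, hX', hXc', hmax'⟩ := h'
  have hM : M = M' := le_antisymm (hvc ▸ hub' v hv) (hvc' ▸ hub v' hv')
  refine ⟨hM, le_antisymm ?_ ?_⟩
  · exact hmax' X hX (by rw [hXc, hM])
  · exact hmax X' hX' (by rw [hXc', hM])

lemma GoodPair.perm {l l' : List Int} {M X : Int} (hp : l.Perm l')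
    (h : GoodPair l M X) : GoodPair l' M X := by
  obtain ⟨hub, hex, hX, hXc, hmax⟩ := h
  refine ⟨?_, ?_, hp.mem_iff.mp hX, by rw [← hp.count_eq]; exact hXc, ?_⟩
  · intro v hv; rw [← hp.count_eq]; exact hub v (hp.mem_iff.mpr hv)
  · obtain ⟨v, hv, hvc⟩ := hex
    exact ⟨v, hp.mem_iff.mp hv, by rw [← hp.count_eq]; exact hvc⟩
  · intro v hv hvc
    exact hmax v (hp.mem_iff.mpr hv) (by rw [hp.count_eq]; exact hvc)

-- virtual count seen by B's scan: rm pending occurrences of rv plus the rest of the list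
def cnt (rv rm : Int) (L : List Int) (v : Int) : Int :=
  (if v = rv then rm else 0) + (L.count v : Int)

lemma cnt_nil (rv rm v : Int) : cnt rv rm [] v = if v = rv then rm else 0 := by
  simp [cnt]

-- the heart of the B-side proof: the run scan, from any mid-run state, finalized
lemma foldB_char (L : List Int) : ∀ rv rm bm bv : Int, L.Pairwise (· ≤ ·) → (∀ x ∈ L, rv ≤ x) →
    (let st := L.foldl mdStep (rv, rm, bm, bv)
     let R := if st.2.2.1 ≤ st.2.1 then (st.2.1, st.1) else (st.2.2.1, st.2.2.2)
     (∀ v ∈ rv :: L, cnt rv rm L v ≤ R.1) ∧ bm ≤ R.1 ∧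
     ((∃ v ∈ rv :: L, cnt rv rm L v = R.1 ∧ R.2 = v ∧ ∀ w ∈ rv :: L, cnt rv rm L w = R.1 → w ≤ R.2)
      ∨ (R.1 = bm ∧ R.2 = bv ∧ ∀ v ∈ rv :: L, cnt rv rm L v < bm))) := by
  induction L with
  | nil =>
    intro rv rm bm bv _ _
    by_cases h : bm ≤ rm
    · simp only [List.foldl_nil, if_pos h]
      refine ⟨?_, h, Or.inl ⟨rv, by simp, by simp [cnt_nil], rfl, ?_⟩⟩
      · intro v hv
        have hv' : v = rv := by simpa using hv
        subst hv'; simp [cnt_nil]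
      · intro w hw _
        have hw' : w = rv := by simpa using hw
        subst hw'; rfl
    · simp only [List.foldl_nil, if_neg h]
      refine ⟨?_, le_refl _, Or.inr ⟨by simp, by simp, ?_⟩⟩
      · intro v hv
        have hv' : v = rv := by simpa using hv
        subst hv'; simp [cnt_nil]; omega
      · intro v hv
        have hv' : v = rv := by simpa using hv
        subst hv'; simp [cnt_nil]; omega
  | cons d L' ih =>
    intro rv rm bm bv hs hge
    have hs' : L'.Pairwise (· ≤ ·) := hs.of_cons
    have hdL' : ∀ x ∈ L', d ≤ x := fun x hx => List.rel_of_pairwise_cons hs hx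
    by_cases hd : d = rv
    · -- extend the current run
      subst hd
      have h1 : (d :: L').foldl mdStep (d, rm, bm, bv) = L'.foldl mdStep (d, rm + 1, bm, bv) := by
        simp [List.foldl_cons, mdStep]
      rw [h1]
      have := ih d (rm + 1) bm bv hs' hdL'
      obtain ⟨hub, hbm, hdisj⟩ := this
      have hc : ∀ v, cnt d rm (d :: L') v = cnt d (rm + 1) L' v := by
        intro v; by_cases hv : v = d <;> simp [cnt, hv, List.count_cons] <;> omega
      have hmemiff : ∀ v, v ∈ d :: d :: L' ↔ v ∈ d :: L' := by intro v; simp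
      refine ⟨?_, hbm, ?_⟩
      · intro v hv; rw [hc]; exact hub v ((hmemiff v).mp hv)
      · rcases hdisj with ⟨v, hv, hvc, hR, hmax⟩ | ⟨h1', h2', h3'⟩
        · exact Or.inl ⟨v, (hmemiff v).mpr hv, by rw [hc]; exact hvc, hR,
            fun w hw hwc => hmax w ((hmemiff w).mp hw) (by rw [← hc]; exact hwc)⟩
        · exact Or.inr ⟨h1', h2', fun v hv => by rw [hc]; exact h3' v ((hmemiff v).mp hv)⟩
    · -- commit the run and start a new one at d
      have hrvd : rv < d := lt_of_le_of_ne (hge d (by simp)) (Ne.symm hd)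
      have hrvL' : rv ∉ L' := fun h => absurd (hdL' rv h) (by omega)
      have hrvL : (d :: L').count rv = 0 := by
        simp [hd, List.count_eq_zero.mpr hrvL']
      have hcrv : cnt rv rm (d :: L') rv = rm := by simp [cnt, hrvL]
      have hcother : ∀ v, v ≠ rv → cnt rv rm (d :: L') v = cnt d 1 L' v := by
        intro v hv
        by_cases hvd : v = d <;> simp [cnt, hv, hvd, List.count_cons] <;> omega
      have hstep : mdStep (rv, rm, bm, bv) d =
          (if bm ≤ rm then (d, 1, rm, rv) else (d, 1, bm, bv)) := by
        simp [mdStep, hd]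
      by_cases hcommit : bm ≤ rm
      · rw [List.foldl_cons, hstep, if_pos hcommit]
        obtain ⟨hub, hbm, hdisj⟩ := ih d 1 rm rv hs' hdL'
        refine ⟨?_, le_trans hcommit hbm, ?_⟩
        · intro v hv
          by_cases hvrv : v = rv
          · subst hvrv; rw [hcrv]; exact hbm
          · rw [hcother v hvrv]
            exact hub v ((List.mem_cons.mp hv).resolve_left hvrv)
        · rcases hdisj with ⟨v, hv, hvc, hR, hmax⟩ | ⟨h1', h2', h3'⟩
          · refine Or.inl ⟨v, List.mem_cons_of_mem _ hv, ?_, hR, ?_⟩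
            · have hvne : v ≠ rv := fun h => absurd (h ▸ hv) (by
                intro hcon; rcases List.mem_cons.mp hcon with h' | h'
                · exact absurd h' (ne_of_lt hrvd)
                · exact hrvL' h')
              rw [hcother v hvne]; exact hvc
            · intro w hw hwc
              by_cases hwrv : w = rv
              · subst hwrv
                have hdv : d ≤ v := by
                  rcases List.mem_cons.mp hv with h | h
                  · exact le_of_eq h.symm
                  · exact hdL' v h
                rw [hR]; omega
              · exact hmax w ((List.mem_cons.mp hw).resolve_left hwrv)
                  (by rw [← hcother w hwrv]; exact hwc)
          · -- new-run side never beat rm: the committed (rm, rv) stands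
            refine Or.inl ⟨rv, List.mem_cons_self, by rw [hcrv, h1'], by rw [h2'], ?_⟩
            intro w hw hwc
            by_cases hwrv : w = rv
            · subst hwrv; rw [h2']
            · have := h3' w ((List.mem_cons.mp hw).resolve_left hwrv)
              rw [hcother w hwrv] at hwc; omega
      · rw [List.foldl_cons, hstep, if_neg hcommit]
        obtain ⟨hub, hbm, hdisj⟩ := ih d 1 bm bv hs' hdL'
        refine ⟨?_, hbm, ?_⟩
        · intro v hv
          by_cases hvrv : v = rv
          · subst hvrv; rw [hcrv]; omega
          · rw [hcother v hvrv]; exact hub v ((List.mem_cons.mp hv).resolve_left hvrv)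
        · rcases hdisj with ⟨v, hv, hvc, hR, hmax⟩ | ⟨h1', h2', h3'⟩
          · refine Or.inl ⟨v, List.mem_cons_of_mem _ hv, ?_, hR, ?_⟩
            · have hvne : v ≠ rv := by
                intro h; subst h
                rcases List.mem_cons.mp hv with h' | h'
                · exact absurd h' (ne_of_lt hrvd)
                · exact hrvL' h'
              rw [hcother v hvne]; exact hvc
            · intro w hw hwc
              by_cases hwrv : w = rv
              · subst hwrv
                rw [hcrv] at hwc
                have := hub v hv; omega
              · exact hmax w ((List.mem_cons.mp hw).resolve_left hwrv)
                  (by rw [← hcother w hwrv]; exact hwc)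
          · refine Or.inr ⟨h1', h2', ?_⟩
            intro v hv
            by_cases hvrv : v = rv
            · subst hvrv; rw [hcrv]; omega
            · rw [hcother v hvrv]; exact h3' v ((List.mem_cons.mp hv).resolve_left hvrv)

lemma cnt_zero (rv : Int) (L : List Int) (v : Int) : cnt rv 0 L v = (L.count v : Int) := by
  simp [cnt]

lemma diffs_ne_nil (S1 S2 : List Int) (h1 : S1 ≠ []) (h2 : S2 ≠ []) :
    S1.flatMap (fun s1 => S2.map (fun s2 => s1 - s2)) ≠ [] := by
  obtain ⟨a, ha⟩ := List.exists_mem_of_ne_nil S1 h1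
  obtain ⟨b, hb⟩ := List.exists_mem_of_ne_nil S2 h2
  intro h
  have hmem : a - b ∈ S1.flatMap (fun s1 => S2.map (fun s2 => s1 - s2)) :=
    List.mem_flatMap.mpr ⟨a, ha, List.mem_map_of_mem hb⟩
  rw [h] at hmem
  exact (List.not_mem_nil).elim hmem

lemma alt_good (S1 S2 : List Int) (h1 : S1 ≠ []) (h2 : S2 ≠ []) :
    GoodPair (S1.flatMap (fun s1 => S2.map (fun s2 => s1 - s2)))
      (minkowski_difference_alt S1 S2).1 (minkowski_difference_alt S1 S2).2 := by
  have hne := diffs_ne_nil S1 S2 h1 h2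
  have hperm := PySem.List.sorted_perm (S1.flatMap (fun s1 => S2.map (fun s2 => s1 - s2))) (fun x : Int => x) false
  have hpw := PySem.List.sorted_pairwise (S1.flatMap (fun s1 => S2.map (fun s2 => s1 - s2))) (fun x : Int => x)
  rcases hL : PySem.List.sorted (S1.flatMap (fun s1 => S2.map (fun s2 => s1 - s2))) (fun x => x) false with _ | ⟨d0, t⟩
  · exact absurd ((PySem.List.sorted_eq_nil_iff _ _ _).mp hL) hne
  · rw [hL] at hperm hpw
    have hpw' : (d0 :: t).Pairwise (· ≤ ·) := hpw
    have hge : ∀ x ∈ d0 :: t, d0 ≤ x := by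
      intro x hx
      rcases List.mem_cons.mp hx with h | h
      · exact le_of_eq h.symm
      · exact List.rel_of_pairwise_cons hpw' h
    obtain ⟨hub, _, hdisj⟩ := foldB_char (d0 :: t) d0 0 0 d0 hpw' hge
    have halt : minkowski_difference_alt S1 S2 =
        (if ((d0 :: t).foldl mdStep (d0, 0, 0, d0)).2.2.1 ≤ ((d0 :: t).foldl mdStep (d0, 0, 0, d0)).2.1
         then (((d0 :: t).foldl mdStep (d0, 0, 0, d0)).2.1, ((d0 :: t).foldl mdStep (d0, 0, 0, d0)).1)
         else (((d0 :: t).foldl mdStep (d0, 0, 0, d0)).2.2.1, ((d0 :: t).foldl mdStep (d0, 0, 0, d0)).2.2.2)) := by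
      simp only [minkowski_difference_alt]
      rw [hL]
    rw [halt]
    refine GoodPair.perm hperm ?_
    rcases hdisj with ⟨v, hv, hvc, hR, hmax⟩ | ⟨_, _, h3'⟩
    · have hv' : v ∈ d0 :: t := by
        rcases List.mem_cons.mp hv with h | h
        · exact h ▸ List.mem_cons_self
        · exact h
      rw [cnt_zero] at hvc
      refine ⟨?_, ⟨v, hv', hvc⟩, hR ▸ hv', by rw [hR]; exact hvc, ?_⟩
      · intro w hw
        have := hub w (List.mem_cons_of_mem d0 hw)
        rwa [cnt_zero] at this
      · intro w hw hwc
        exact hmax w (List.mem_cons_of_mem d0 hw) (by rw [cnt_zero]; exact hwc)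
    · exfalso
      have := h3' d0 List.mem_cons_self
      rw [cnt_zero] at this
      have h0 : (0 : Int) ≤ ((d0 :: t).count d0 : Int) := Int.natCast_nonneg _
      omega

lemma a_good (S1 S2 : List Int) (h1 : S1 ≠ []) (h2 : S2 ≠ []) :
    GoodPair (S1.flatMap (fun s1 => S2.map (fun s2 => s1 - s2)))
      (minkowski_difference S1 S2).1 (minkowski_difference S1 S2).2 := by
  have hne := diffs_ne_nil S1 S2 h1 h2
  have hD : S1.foldl (fun d s1 =>
      S2.foldl (fun d s2 => d.modify (s1 - s2) 0 (· + 1)) d) (PySem.Dict.empty : PySem.Dict Int Int)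
      = PySem.Dict.counter (S1.flatMap (fun s1 => S2.map (fun s2 => s1 - s2))) := by
    rw [PySem.Dict.counter_eq_foldl, List.foldl_flatMap]
    simp [List.foldl_map]
  have hvals : (PySem.Dict.counter (S1.flatMap (fun s1 => S2.map (fun s2 => s1 - s2)))).values
      = (PySem.Set.ofList (S1.flatMap (fun s1 => S2.map (fun s2 => s1 - s2)))).map
          (fun k => ((S1.flatMap (fun s1 => S2.map (fun s2 => s1 - s2))).count k : Int)) := by
    simp [PySem.Dict.values, PySem.Dict.items_counter, List.map_map, Function.comp]
  simp only [minkowski_difference, hD, hvals]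
  rcases hm : PySem.List.max?
      ((PySem.Set.ofList (S1.flatMap (fun s1 => S2.map (fun s2 => s1 - s2)))).map
        (fun k => ((S1.flatMap (fun s1 => S2.map (fun s2 => s1 - s2))).count k : Int)))
      (fun v => v) with _ | m
  · exfalso
    rw [PySem.List.max?_eq_none_iff, List.map_eq_nil_iff] at hm
    obtain ⟨a, ha⟩ := List.exists_mem_of_ne_nil _ hne
    have hmem := (PySem.Set.mem_ofList _ a).mpr ha
    rw [hm] at hmem
    exact (List.not_mem_nil).elim hmem
  · -- m is max(differences.values())
    simp only [Option.getD_some]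
    have hmmem := PySem.List.max?_mem hm
    have hmmax := PySem.List.max?_isMax hm
    obtain ⟨k0, hk0set, hk0⟩ := List.mem_map.mp hmmem
    have hk0mem : k0 ∈ S1.flatMap (fun s1 => S2.map (fun s2 => s1 - s2)) :=
      (PySem.Set.mem_ofList _ k0).mp hk0set
    have hub : ∀ v ∈ S1.flatMap (fun s1 => S2.map (fun s2 => s1 - s2)),
        (((S1.flatMap (fun s1 => S2.map (fun s2 => s1 - s2))).count v : Int)) ≤ m := by
      intro v hv
      exact hmmax _ (List.mem_map_of_mem ((PySem.Set.mem_ofList _ v).mpr hv))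
    -- the filtered key list
    have hfil : (((PySem.Set.ofList (S1.flatMap (fun s1 => S2.map (fun s2 => s1 - s2)))).map
          (fun k => (k, ((S1.flatMap (fun s1 => S2.map (fun s2 => s1 - s2))).count k : Int)))).filter
            (fun kv => kv.2 == m)).map Prod.fst
        = (PySem.Set.ofList (S1.flatMap (fun s1 => S2.map (fun s2 => s1 - s2)))).filter
            (fun k => ((S1.flatMap (fun s1 => S2.map (fun s2 => s1 - s2))).count k : Int) == m) := by
      rw [List.filter_map, List.map_map]
      simp [Function.comp_def]
    simp only [PySem.Dict.items_counter, hfil]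
    rcases hx : PySem.List.max?
        ((PySem.Set.ofList (S1.flatMap (fun s1 => S2.map (fun s2 => s1 - s2)))).filter
          (fun k => ((S1.flatMap (fun s1 => S2.map (fun s2 => s1 - s2))).count k : Int) == m))
        (fun k => k) with _ | x
    · exfalso
      rw [PySem.List.max?_eq_none_iff] at hx
      have : k0 ∈ (PySem.Set.ofList (S1.flatMap (fun s1 => S2.map (fun s2 => s1 - s2)))).filter
          (fun k => ((S1.flatMap (fun s1 => S2.map (fun s2 => s1 - s2))).count k : Int) == m) :=
        List.mem_filter.mpr ⟨hk0set, beq_iff_eq.mpr hk0⟩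
      rw [hx] at this
      exact (List.not_mem_nil).elim this
    · simp only [Option.getD_some]
      have hxmem := PySem.List.max?_mem hx
      have hxmax := PySem.List.max?_isMax hx
      obtain ⟨hxset, hxcnt⟩ := List.mem_filter.mp hxmem
      refine ⟨?_, ⟨k0, hk0mem, hk0⟩, (PySem.Set.mem_ofList _ x).mp hxset, beq_iff_eq.mp hxcnt, ?_⟩
      · intro v hv; simpa using hub v hv
      · intro v hv hvc
        exact hxmax v (List.mem_filter.mpr ⟨(PySem.Set.mem_ofList _ v).mpr hv, beq_iff_eq.mpr hvc⟩)

-- ===== VERDICT (by name: the statement is the Claim_ definition above) =====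
theorem minkowski_difference_spec : Claim_equal_minkowski_difference := by
  intro S1 S2 _ hpre
  obtain ⟨h1, h2⟩ := hpre
  have hA := a_good S1 S2 h1 h2
  have hB := alt_good S1 S2 h1 h2
  have := GoodPair.unique hA hB
  unfold Spec_minkowski_difference
  exact Prod.ext this.1 this.2
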